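-- pv_equiv track=rewrite | github.com/kkzk/CarryOutApproval | users/ldap_service.py | _extract_ou_hierarchy
-- ===== SOURCE A (Python) =====
-- def _extract_ou_hierarchy(user_dn: str):
--     ou_parts = []
--     dc_parts = []
--     for part in user_dn.split(','):
--         p = part.strip()
--         if p.startswith('OU='):
--             ou_parts.append(p)
--         elif p.startswith('DC='):
--             dc_parts.append(p)
--     base_dn = ','.join(dc_parts)
--     ou_list = [','.join(ou_parts[i:] + dc_parts) for i in range(len(ou_parts))]
--     if base_dn and base_dn not in ou_list:
--         ou_list.append(base_dn)
--     return ou_list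
-- ===== SOURCE B (Python) =====
-- def _extract_ou_hierarchy(user_dn: str):
--     ou_parts = []
--     dc_parts = []
--     for part in user_dn.split(','):
--         p = part.strip()
--         if p.startswith('OU='):
--             ou_parts.append(p)
--         elif p.startswith('DC='):
--             dc_parts.append(p)
--     base_dn = ','.join(dc_parts)
--     # build each suffix-join incrementally from the right instead of re-joining per index
--     rev = []
--     acc = base_dn
--     for p in reversed(ou_parts):
--         acc = p if acc == '' else p + ',' + acc
--         rev.append(acc)
--     ou_list = rev[::-1]
--     if base_dn and base_dn not in ou_list:
--         ou_list.append(base_dn)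
--     return ou_list
-- ===== Notes on version B (the rewrite author's own statement) =====
-- stated objective: faster
-- what changed: Instead of re-joining ou_parts[i:]+dc_parts from scratch for every index i, B builds the suffix joins in one right-to-left pass over ou_parts maintaining a running suffix string, then reverses the collected list.
import Mathlib
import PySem

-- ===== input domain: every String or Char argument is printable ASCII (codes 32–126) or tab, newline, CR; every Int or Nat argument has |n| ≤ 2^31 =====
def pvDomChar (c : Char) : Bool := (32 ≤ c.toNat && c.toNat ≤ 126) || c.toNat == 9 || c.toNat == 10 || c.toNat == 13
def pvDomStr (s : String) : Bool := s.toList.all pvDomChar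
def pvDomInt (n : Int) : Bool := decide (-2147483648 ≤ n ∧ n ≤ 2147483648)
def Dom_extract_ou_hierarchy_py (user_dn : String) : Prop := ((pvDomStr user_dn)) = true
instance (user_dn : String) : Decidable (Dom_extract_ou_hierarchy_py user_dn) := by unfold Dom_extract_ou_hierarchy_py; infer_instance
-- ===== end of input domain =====

-- B replaces A's per-index re-join of ou_parts[i:]+dc_parts by one right-to-left pass that
-- maintains the running suffix string (avoiding the per-index list slice+join); the
-- classification pass is shared. Proved: A = B on the whole domain.

-- ===== PORT A =====
-- the first pass ('for part in user_dn.split(','): …') is textually identical in A and in B (Source B);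
-- it is transliterated once here and used by both ports
def pvClassify (parts : List String) : List String × List String :=
  parts.foldl (fun (st : List String × List String) part =>
    let p := PySem.Str.strip part
    if PySem.Str.startswith p "OU=" then (st.1 ++ [p], st.2)
    else if PySem.Str.startswith p "DC=" then (st.1, st.2 ++ [p])
    else st) ([], [])

def extract_ou_hierarchy_py (user_dn : String) : List String :=
  -- sep "," is nonempty, so split? is always `some`; getD is never the default
  let st := pvClassify ((PySem.Str.split? user_dn ",").getD [])
  let base_dn := PySem.Str.join "," st.2
  let ou_list := (PySem.List.pyRange 0 st.1.length 1).map (fun i =>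
      PySem.Str.join "," (PySem.List.slice st.1 (some i) none ++ st.2))
  if base_dn ≠ "" ∧ base_dn ∉ ou_list then ou_list ++ [base_dn] else ou_list

-- ===== PORT B =====
-- p + ',' + acc of Source B, exact on code points
def pvConcat (p acc : String) : String := String.ofList (p.toList ++ ',' :: acc.toList)

def extract_ou_hierarchy_py_alt (user_dn : String) : List String :=
  let st := pvClassify ((PySem.Str.split? user_dn ",").getD [])
  let base_dn := PySem.Str.join "," st.2
  -- 'for p in reversed(ou_parts): acc = …; rev.append(acc)'
  let fin := st.1.reverse.foldl (fun (s : String × List String) p =>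
      let acc := if s.1 = "" then p else pvConcat p s.1
      (acc, s.2 ++ [acc])) (base_dn, ([] : List String))
  let ou_list := fin.2.reverse   -- rev[::-1]
  if base_dn ≠ "" ∧ base_dn ∉ ou_list then ou_list ++ [base_dn] else ou_list

-- ===== PRECONDITION & SPEC =====
def Spec_extract_ou_hierarchy_py (user_dn : String) (out : List String) : Prop := out = extract_ou_hierarchy_py_alt user_dn
instance (user_dn : String) (out : List String) : Decidable (Spec_extract_ou_hierarchy_py user_dn out) := by unfold Spec_extract_ou_hierarchy_py; infer_instance

-- ===== CLAIM (what is proved, stated in full; the proofs are below) =====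
def Claim_equal_extract_ou_hierarchy_py : Prop := ∀ (user_dn : String), Dom_extract_ou_hierarchy_py user_dn → Spec_extract_ou_hierarchy_py user_dn (extract_ou_hierarchy_py user_dn)

-- ===== LEMMAS AND PROOFS =====

-- A's comprehension, as a function of the classified parts
def pvAmap (ou dc : List String) : List String :=
  (PySem.List.pyRange 0 ou.length 1).map (fun i =>
      PySem.Str.join "," (PySem.List.slice ou (some i) none ++ dc))

lemma pvAmap_eq (ou dc : List String) :
    pvAmap ou dc = (List.range ou.length).map (fun k => PySem.Str.join "," (ou.drop k ++ dc)) := by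
  unfold pvAmap
  rw [PySem.List.pyRange_one]
  simp [List.map_map, Function.comp_def, PySem.List.slice_from_natCast]

lemma startswith_ne_empty (p pre : String) (h : PySem.Str.startswith p pre = true)
    (hpre : pre ≠ "") : p ≠ "" := by
  intro rfl_p
  subst rfl_p
  rw [show PySem.Str.startswith "" pre = PySem.Chars.startswith "".toList pre.toList from by
        simp] at h
  rw [PySem.Chars.startswith_iff] at h
  have : pre.toList = [] := List.prefix_nil.mp (by simpa using h)
  exact hpre (String.toList_inj.mp (by simpa using this))

lemma pvClassify_inv (parts : List String) :
    (∀ s ∈ (pvClassify parts).1, s ≠ "") ∧ (∀ s ∈ (pvClassify parts).2, s ≠ "") := by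
  unfold pvClassify
  suffices H : ∀ (st : List String × List String),
      (∀ s ∈ st.1, s ≠ "") → (∀ s ∈ st.2, s ≠ "") →
      (∀ s ∈ (parts.foldl (fun (st : List String × List String) part =>
          let p := PySem.Str.strip part
          if PySem.Str.startswith p "OU=" then (st.1 ++ [p], st.2)
          else if PySem.Str.startswith p "DC=" then (st.1, st.2 ++ [p])
          else st) st).1, s ≠ "") ∧
      (∀ s ∈ (parts.foldl (fun (st : List String × List String) part =>
          let p := PySem.Str.strip part
          if PySem.Str.startswith p "OU=" then (st.1 ++ [p], st.2)
          else if PySem.Str.startswith p "DC=" then (st.1, st.2 ++ [p])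
          else st) st).2, s ≠ "") by
    exact H ([], []) (by simp) (by simp)
  induction parts with
  | nil => intro st h1 h2; exact ⟨h1, h2⟩
  | cons part rest ih =>
    intro st h1 h2
    simp only [List.foldl_cons]
    split_ifs with hOU hDC
    · exact ih _ (by
        intro s hs
        rcases List.mem_append.mp hs with hs | hs
        · exact h1 s hs
        · simp only [List.mem_singleton] at hs
          subst hs; exact startswith_ne_empty _ _ hOU (by decide)) h2
    · exact ih _ h1 (by
        intro s hs
        rcases List.mem_append.mp hs with hs | hs
        · exact h2 s hs
        · simp only [List.mem_singleton] at hs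
          subst hs; exact startswith_ne_empty _ _ hDC (by decide))
    · exact ih _ h1 h2

lemma join_singleton_str (p : String) : PySem.Str.join "," [p] = p := by
  apply String.toList_inj.mp
  rw [PySem.Str.toList_join]
  simp [PySem.Chars.join_singleton]

lemma join_cons_cons_str (p q : String) (r : List String) :
    PySem.Str.join "," (p :: q :: r) = pvConcat p (PySem.Str.join "," (q :: r)) := by
  apply String.toList_inj.mp
  rw [PySem.Str.toList_join]
  simp only [List.map_cons, PySem.Chars.join_cons_cons, pvConcat]
  rw [String.toList_ofList, PySem.Str.toList_join]
  simp

lemma join_ne_empty (q : String) (r : List String) (hq : q ≠ "") :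
    PySem.Str.join "," (q :: r) ≠ "" := by
  intro h
  have h' : (PySem.Str.join "," (q :: r)).toList = [] := by rw [h]; rfl
  rw [PySem.Str.toList_join] at h'
  cases r with
  | nil =>
    simp [PySem.Chars.join_singleton] at h'
    exact hq (String.toList_inj.mp (by simpa using h'))
  | cons a t =>
    simp only [List.map_cons, PySem.Chars.join_cons_cons] at h'
    simp at h'

-- one step of B's loop produces exactly the next longer join
lemma step_join (p : String) (rest : List String) (hne : ∀ s ∈ rest, s ≠ "") :
    (if PySem.Str.join "," rest = "" then p else pvConcat p (PySem.Str.join "," rest))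
      = PySem.Str.join "," (p :: rest) := by
  cases rest with
  | nil =>
    have h0 : PySem.Str.join "," ([] : List String) = "" := by
      apply String.toList_inj.mp
      rw [PySem.Str.toList_join]
      simp [PySem.Chars.join_nil]
    rw [if_pos h0, join_singleton_str]
  | cons q r =>
    rw [if_neg (join_ne_empty q r (hne q (by simp))), join_cons_cons_str]

-- B's right-to-left loop computes the full join and A's comprehension reversed
lemma main_loop (dc : List String) (ou : List String) (hne : ∀ s ∈ ou ++ dc, s ≠ "") :
    ou.reverse.foldl (fun (s : String × List String) p =>
        let acc := if s.1 = "" then p else pvConcat p s.1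
        (acc, s.2 ++ [acc])) (PySem.Str.join "," dc, ([] : List String))
      = (PySem.Str.join "," (ou ++ dc), (pvAmap ou dc).reverse) := by
  rw [List.foldl_reverse]
  induction ou with
  | nil =>
    simp [pvAmap_eq]
  | cons p t ih =>
    have hne' : ∀ s ∈ t ++ dc, s ≠ "" := by
      intro s hs
      refine hne s ?_
      rcases List.mem_append.mp hs with hs | hs
      · exact List.mem_append.mpr (Or.inl (List.mem_cons_of_mem _ hs))
      · exact List.mem_append.mpr (Or.inr hs)
    rw [List.foldr_cons, ih hne']
    simp only
    have hstep := step_join p (t ++ dc) hne'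
    rw [hstep]
    -- pvAmap (p :: t) dc = join (p :: t ++ dc) :: pvAmap t dc, reversed
    have hcons : pvAmap (p :: t) dc
        = PySem.Str.join "," (p :: (t ++ dc)) :: pvAmap t dc := by
      rw [pvAmap_eq, pvAmap_eq, List.length_cons, List.range_succ_eq_map, List.map_cons,
        List.map_map]
      simp [Function.comp_def]
    rw [hcons]
    simp

-- ===== VERDICT (by name: the statement is the Claim_ definition above) =====
theorem extract_ou_hierarchy_py_spec : Claim_equal_extract_ou_hierarchy_py := by
  intro user_dn _
  unfold Spec_extract_ou_hierarchy_py extract_ou_hierarchy_py extract_ou_hierarchy_py_alt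
  simp only
  set parts := (PySem.Str.split? user_dn ",").getD [] with hparts
  obtain ⟨h1, h2⟩ := pvClassify_inv parts
  have hne : ∀ s ∈ (pvClassify parts).1 ++ (pvClassify parts).2, s ≠ "" := by
    intro s hs
    rcases List.mem_append.mp hs with hs | hs
    · exact h1 s hs
    · exact h2 s hs
  rw [main_loop _ _ hne]
  simp only [List.reverse_reverse]
  rfl
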